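-- pv_equiv track=rewrite | github.com/Minerstove/Python | cs11/hope-1/(download_and_submit_code_here!)_offline_judge/4_we_know/OJ/model_solution.py | we_know
-- ===== SOURCE A (Python) =====
-- def ltn(l): #letter to num
--     l=l.upper()
--     return (ord(l)-ord('A')+1)
--
-- def ntl(n): #num to letter
--     return chr((ord('A')+(n-1)%26))
--
-- def keep_punc(s_old,s_new,o=0,d=0):
--     if o==len(s_old): return ""
--     if not s_old[o].isalpha():
--         return s_old[o]+keep_punc(s_old,s_new,o+1,d)
--     elif s_old[o].lower() == s_old[o]:
--         return s_new[d].lower()+keep_punc(s_old,s_new,o+1,d+1)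
--     else: return s_new[d]+keep_punc(s_old,s_new,o+1,d+1)
--
-- def we_know(k,s):
--     s_old = s
--     s=[i.upper() for i in s if i.isalpha()]
--     k=[i.upper() for i in k if i.isalpha()]
--
--     diff = tuple(ltn(i)+1 for i in k)
--     s_new =tuple(ntl((ltn(s[i])-diff[i%len(k)])+1)
--     for i in range(len(s)))
--
--     s_final = keep_punc(s_old,s_new)
--     return s_final
-- ===== SOURCE B (Python) =====
-- def we_know(k, s):
--     key = [c.upper() for c in k if c.isalpha()]
--     out = []
--     ki = 0
--     for ch in s:
--         if not ch.isalpha():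
--             out.append(ch)
--         else:
--             d = chr(ord('A') + (ord(ch.upper()) - ord(key[ki % len(key)]) - 1) % 26)
--             out.append(d.lower() if ch.islower() else d)
--             ki += 1
--     return ''.join(out)
-- ===== Notes on version B (the rewrite author's own statement) =====
-- stated objective: simpler
-- what changed: B replaces A's three-phase pipeline (filter letters, precompute the whole decrypted tuple, recursive keep_punc merge) by one direct loop over the original string with a key counter that advances only on letters, decrypting each letter in place.
import Mathlib
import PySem

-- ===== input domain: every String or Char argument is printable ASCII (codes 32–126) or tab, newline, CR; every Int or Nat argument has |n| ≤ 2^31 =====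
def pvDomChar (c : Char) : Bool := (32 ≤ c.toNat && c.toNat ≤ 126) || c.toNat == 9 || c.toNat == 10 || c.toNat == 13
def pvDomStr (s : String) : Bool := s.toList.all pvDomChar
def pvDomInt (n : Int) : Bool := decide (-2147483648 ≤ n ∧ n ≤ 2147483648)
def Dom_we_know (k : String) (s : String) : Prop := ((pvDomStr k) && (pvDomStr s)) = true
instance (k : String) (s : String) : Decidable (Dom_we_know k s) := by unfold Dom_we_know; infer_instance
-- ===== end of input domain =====

-- B is one direct pass over the original string with a key counter instead of A's
-- filter + precomputed tuple + recursive keep_punc merge; same return value on Pre_.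

-- ===== PORT A =====
-- Python rebinds l = l.upper() first; written inline (no let) for the same value
def ltn (l : Char) : Int :=
  ((PySem.Chars.upperChar l).toNat : Int) - ('A'.toNat : Int) + 1

def ntl (n : Int) : Char :=
  Char.ofNat ('A'.toNat + (PySem.Int.mod (n - 1) 26).toNat)

-- Python's index o advances in lockstep with the traversal, ported as structural
-- recursion on s_old; s_new[d] ported as getD (the IndexError branch is unreachable:
-- s_new carries exactly one letter per alpha char of s_old).
def keep_punc : List Char → List Char → Nat → List Char
  | [], _, _ => []
  | c :: rest, sn, d =>
    if ¬ (PySem.Chars.isalpha c) then c :: keep_punc rest sn d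
    else if PySem.Chars.lowerChar c == c then
      PySem.Chars.lowerChar (sn.getD d 'A') :: keep_punc rest sn (d + 1)
    else sn.getD d 'A' :: keep_punc rest sn (d + 1)

-- Python's i % len(k) raises ZeroDivisionError when len(k) = 0 and is Nat-mod otherwise;
-- the zero case is excluded by Pre_we_know, so Nat % is exact here.
def we_know (k : String) (s : String) : String :=
  let s_old := s.toList
  let sU := (s_old.filter PySem.Chars.isalpha).map PySem.Chars.upperChar
  let kU := (k.toList.filter PySem.Chars.isalpha).map PySem.Chars.upperChar
  let diff := kU.map (fun i => ltn i + 1)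
  let s_new := (List.range sU.length).map
    (fun i => ntl ((ltn (sU.getD i 'A') - diff.getD (i % kU.length) 0) + 1))
  String.mk (keep_punc s_old s_new 0)

-- ===== PORT B =====
-- key[ki % len(key)] raises ZeroDivisionError for an empty key (excluded by Pre_);
-- otherwise ki % len(key) is in range, so getD is exact.
def bLoop (key : List Char) : List Char → Nat → List Char
  | [], _ => []
  | ch :: rest, ki =>
    if ¬ (PySem.Chars.isalpha ch) then ch :: bLoop key rest ki
    else
      let d := Char.ofNat ('A'.toNat +
        (PySem.Int.mod (((PySem.Chars.upperChar ch).toNat : Int)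
          - ((key.getD (ki % key.length) 'A').toNat : Int) - 1) 26).toNat)
      (if PySem.Chars.islower ch then PySem.Chars.lowerChar d else d) :: bLoop key rest (ki + 1)

def we_know_alt (k : String) (s : String) : String :=
  let key := (k.toList.filter PySem.Chars.isalpha).map PySem.Chars.upperChar
  String.mk (bLoop key s.toList 0)

-- ===== PRECONDITION & SPEC =====
-- Pre_ excludes exactly the inputs on which A (and B) raise ZeroDivisionError:
-- a key without letters together with a message containing a letter.
def Pre_we_know (k : String) (s : String) : Prop :=
  (k.toList.any PySem.Chars.isalpha) = true ∨
  (s.toList.all (fun c => !PySem.Chars.isalpha c)) = true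
instance (k : String) (s : String) : Decidable (Pre_we_know k s) := by
  unfold Pre_we_know; infer_instance

def pvWitness_we_know : String × String := ("Key", "Hi, there!")

def Spec_we_know (k : String) (s : String) (out : String) : Prop := out = we_know_alt k s
instance (k : String) (s : String) (out : String) : Decidable (Spec_we_know k s out) := by
  unfold Spec_we_know; infer_instance

-- ===== CLAIM (what is proved, stated in full; the proofs are below) =====
def Claim_equal_we_know : Prop :=
  ∀ (k : String) (s : String), Dom_we_know k s → Pre_we_know k s →
    Spec_we_know k s (we_know k s)

-- ===== LEMMAS AND PROOFS =====

-- drop-form of keep_punc, used only in the proof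
def kpD : List Char → List Char → List Char
  | [], _ => []
  | c :: rest, sn =>
    if ¬ (PySem.Chars.isalpha c) then c :: kpD rest sn
    else if PySem.Chars.lowerChar c == c then
      PySem.Chars.lowerChar (sn.getD 0 'A') :: kpD rest sn.tail
    else sn.getD 0 'A' :: kpD rest sn.tail

-- A's decrypted stream, generated directly from the filtered-uppercased letters
def hU (key : List Char) : Nat → List Char → List Char
  | _, [] => []
  | d, c :: cs =>
    ntl ((ltn c - ((key.map (fun i => ltn i + 1)).getD (d % key.length) 0)) + 1)
      :: hU key (d + 1) cs

lemma char_le_iff {a b : Char} : a ≤ b ↔ a.toNat ≤ b.toNat := by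
  rw [Char.le_def, UInt32.le_iff_toNat_le]
  exact Iff.rfl

lemma toNat_ofNat_small {n : Nat} (h : n < 55296) :
    (Char.ofNat n).toNat = n := by
  rw [Char.toNat_ofNat, if_pos (Or.inl h)]

lemma keep_punc_eq_kpD (xs : List Char) :
    ∀ sn d, keep_punc xs sn d = kpD xs (sn.drop d) := by
  induction xs with
  | nil => intro sn d; rfl
  | cons c rest ih =>
    intro sn d
    have hget : sn.getD d 'A' = (sn.drop d).getD 0 'A' := by
      simp [List.getD_eq_getElem?_getD, List.getElem?_drop]
    have hdrop : sn.drop (d + 1) = (sn.drop d).tail := by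
      rw [List.tail_drop]
    simp only [keep_punc, kpD]
    split_ifs <;> (rw [ih]; try rw [hget, hdrop])

lemma range_map_hU (key : List Char) (ys : List Char) :
    ∀ d, (List.range ys.length).map
      (fun j => ntl ((ltn (ys.getD j 'A')
        - ((key.map (fun i => ltn i + 1)).getD ((d + j) % key.length) 0)) + 1))
      = hU key d ys := by
  induction ys with
  | nil => intro d; rfl
  | cons y ys ih =>
    intro d
    rw [List.length_cons, List.range_succ_eq_map, List.map_cons, List.map_map]
    simp only [List.getD_cons_zero, Nat.add_zero, hU]
    congr 1
    rw [← ih (d + 1)]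
    apply List.map_congr_left
    intro j _
    simp only [Function.comp_apply, List.getD_cons_succ, Nat.succ_eq_add_one]
    rw [show d + (j + 1) = d + 1 + j from by omega]

lemma upperChar_isupper {c : Char} (h : PySem.Chars.isalpha c = true) :
    'A' ≤ PySem.Chars.upperChar c ∧ PySem.Chars.upperChar c ≤ 'Z' := by
  have e1 : ('A' : Char).toNat = 65 := by decide
  have e2 : ('Z' : Char).toNat = 90 := by decide
  have e3 : ('a' : Char).toNat = 97 := by decide
  have e4 : ('z' : Char).toNat = 122 := by decide
  simp only [PySem.Chars.isalpha, PySem.Chars.isupper, PySem.Chars.islower,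
    Bool.or_eq_true, Bool.and_eq_true, decide_eq_true_eq, char_le_iff,
    e1, e2, e3, e4] at h
  unfold PySem.Chars.upperChar
  simp only [PySem.Chars.islower, Bool.and_eq_true, decide_eq_true_eq]
  split_ifs with hl
  · simp only [char_le_iff, e1, e2, e3, e4] at hl ⊢
    rw [toNat_ofNat_small (by omega)]
    omega
  · simp only [char_le_iff, e1, e2, e3, e4] at hl ⊢
    omega

lemma upperChar_of_upper {c : Char} (h1 : 'A' ≤ c) (h2 : c ≤ 'Z') :
    PySem.Chars.upperChar c = c := by
  rw [char_le_iff] at h1 h2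
  have e1 : ('A' : Char).toNat = 65 := by decide
  have e2 : ('Z' : Char).toNat = 90 := by decide
  rw [e1] at h1; rw [e2] at h2
  unfold PySem.Chars.upperChar
  rw [if_neg]
  intro hc
  simp only [PySem.Chars.islower, Bool.and_eq_true, decide_eq_true_eq, char_le_iff] at hc
  have e3 : ('a' : Char).toNat = 97 := by decide
  rw [e3] at hc
  omega

lemma lower_beq_eq_islower {c : Char} (h : PySem.Chars.isalpha c = true) :
    (PySem.Chars.lowerChar c == c) = PySem.Chars.islower c := by
  have e1 : ('A' : Char).toNat = 65 := by decide
  have e2 : ('Z' : Char).toNat = 90 := by decide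
  have e3 : ('a' : Char).toNat = 97 := by decide
  have e4 : ('z' : Char).toNat = 122 := by decide
  simp only [PySem.Chars.isalpha, Bool.or_eq_true] at h
  unfold PySem.Chars.lowerChar
  rcases h with h | h
  · have hb : PySem.Chars.isupper c = true := h
    rw [if_pos hb]
    simp only [PySem.Chars.isupper, Bool.and_eq_true, decide_eq_true_eq,
      char_le_iff, e1, e2] at h
    have hne : Char.ofNat (c.toNat + 32) ≠ c := by
      intro he
      have := congrArg Char.toNat he
      rw [toNat_ofNat_small (by omega)] at this
      omega
    have hil : PySem.Chars.islower c = false := by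
      simp only [PySem.Chars.islower, Bool.and_eq_false_iff,
        decide_eq_false_iff_not, char_le_iff, e3, e4]
      left; omega
    simp [hne, hil]
  · have hil : PySem.Chars.islower c = true := h
    simp only [PySem.Chars.islower, Bool.and_eq_true, decide_eq_true_eq,
      char_le_iff, e3, e4] at h
    rw [if_neg]
    · simp [hil]
    · simp only [PySem.Chars.isupper, Bool.and_eq_true, decide_eq_true_eq,
        char_le_iff, e1, e2]
      intro hc
      omega

lemma decrypt_char_eq (key : List Char) (hk : key ≠ [])
    (hkey : ∀ x ∈ key, 'A' ≤ x ∧ x ≤ 'Z') (d : Nat) {c : Char}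
    (hc : PySem.Chars.isalpha c = true) :
    ntl ((ltn (PySem.Chars.upperChar c)
        - ((key.map (fun i => ltn i + 1)).getD (d % key.length) 0)) + 1)
    = Char.ofNat ('A'.toNat +
        (PySem.Int.mod (((PySem.Chars.upperChar c).toNat : Int)
          - ((key.getD (d % key.length) 'A').toNat : Int) - 1) 26).toNat) := by
  have hL : 0 < key.length := List.length_pos_iff.mpr hk
  have hm : d % key.length < key.length := Nat.mod_lt _ hL
  have hdg : (key.map (fun i => ltn i + 1)).getD (d % key.length) 0
      = ltn (key.getD (d % key.length) 'A') + 1 := by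
    rw [List.getD_eq_getElem _ _ (by simpa using hm),
        List.getD_eq_getElem _ _ hm, List.getElem_map]
  rw [hdg]
  set kc := key.getD (d % key.length) 'A' with hkc
  have hkcm : kc ∈ key := by
    rw [hkc, List.getD_eq_getElem _ _ hm]; exact List.getElem_mem hm
  obtain ⟨hk1, hk2⟩ := hkey kc hkcm
  have hcu := upperChar_isupper hc
  unfold ntl ltn
  rw [upperChar_of_upper hcu.1 hcu.2, upperChar_of_upper hk1 hk2]
  congr 2
  congr 1
  congr 1
  ring

lemma kpD_hU_eq_bLoop (key : List Char) (hkey : ∀ x ∈ key, 'A' ≤ x ∧ x ≤ 'Z')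
    (xs : List Char) :
    ∀ d, (key ≠ [] ∨ xs.all (fun c => !PySem.Chars.isalpha c) = true) →
      kpD xs (hU key d ((xs.filter PySem.Chars.isalpha).map PySem.Chars.upperChar))
        = bLoop key xs d := by
  induction xs with
  | nil => intro d _; rfl
  | cons c rest ih =>
    intro d hpre
    by_cases hc : PySem.Chars.isalpha c = true
    · have hk : key ≠ [] := by
        rcases hpre with h | h
        · exact h
        · simp [List.all_cons, hc] at h
      have hfilter : (c :: rest).filter PySem.Chars.isalpha
          = c :: rest.filter PySem.Chars.isalpha := by simp [hc]
      rw [hfilter]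
      simp only [List.map_cons, hU, kpD, bLoop, hc, not_true_eq_false, if_false]
      rw [lower_beq_eq_islower hc]
      have hdec := decrypt_char_eq key hk hkey d hc
      have hrec := ih (d + 1) (Or.inl hk)
      simp only [List.getD_cons_zero, List.tail_cons]
      cases hb : PySem.Chars.islower c
      · simp only [Bool.false_eq_true, if_false, hdec, hrec]
      · simp only [if_true, hdec, hrec]
    · have hcf : PySem.Chars.isalpha c = false := by
        cases hx : PySem.Chars.isalpha c
        · rfl
        · exact absurd hx hc
      have hfilter : (c :: rest).filter PySem.Chars.isalpha
          = rest.filter PySem.Chars.isalpha := by simp [hcf]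
      rw [hfilter]
      simp only [kpD, bLoop, hcf, Bool.false_eq_true, not_false_eq_true, if_true]
      refine congrArg _ (ih d ?_)
      rcases hpre with h | h
      · exact Or.inl h
      · right
        simp only [List.all_cons, Bool.and_eq_true] at h
        exact h.2

-- ===== VERDICT (by name: the statement is the Claim_ definition above) =====
theorem we_know_spec : Claim_equal_we_know := by
  intro k s _hdom hpre
  unfold Spec_we_know we_know we_know_alt
  simp only []
  congr 1
  set key := (k.toList.filter PySem.Chars.isalpha).map PySem.Chars.upperChar with hkeydef
  have hkey : ∀ x ∈ key, 'A' ≤ x ∧ x ≤ 'Z' := by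
    intro x hx
    rw [hkeydef] at hx
    obtain ⟨y, hy, rfl⟩ := List.mem_map.mp hx
    exact upperChar_isupper (List.mem_filter.mp hy).2
  have hpre' : key ≠ [] ∨ s.toList.all (fun c => !PySem.Chars.isalpha c) = true := by
    rcases hpre with h | h
    · left
      rw [hkeydef]
      simp only [ne_eq, List.map_eq_nil_iff, List.filter_eq_nil_iff]
      intro hall
      obtain ⟨x, hx, hax⟩ := List.any_eq_true.mp h
      exact hall x hx hax
    · right; exact h
  rw [keep_punc_eq_kpD, List.drop_zero]
  rw [← kpD_hU_eq_bLoop key hkey s.toList 0 hpre']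
  congr 1
  rw [← range_map_hU key _ 0]
  apply List.map_congr_left
  intro j _
  simp
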